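-- pv_equiv track=rewrite | github.com/ngiengkianyew/daily-coding-problem | solutions/problem_312.py | get_arrangement_count
-- ===== SOURCE A (Python) =====
-- def get_arrangement_count(free_spaces):
--     if not free_spaces:
--         return 1
--     elif free_spaces < 2:
--         return 0
--
--     arrangements = 0
--     if free_spaces >= 3:
--         arrangements += (2 + get_arrangement_count(free_spaces - 3))
--     arrangements += (2 + get_arrangement_count(free_spaces - 2))
--
--     return arrangements
-- ===== SOURCE B (Python) =====
-- def get_arrangement_count(free_spaces):
--     # bottom-up rolling DP over the fixed linear recurrence the recursion satisfies
--     if free_spaces < 2: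
--         return 1 if free_spaces == 0 else 0
--     x, y, z = 1, 0, 3
--     for _ in range(free_spaces - 2):
--         x, y, z = y, z, 4 + y + x
--     return z
-- ===== Notes on version B (the rewrite author's own statement) =====
-- stated objective: faster
-- what changed: replaces the exponential double-branch recursion by a bottom-up rolling three-variable DP over a fixed linear recurrence; intended as faster (linear vs exponential), though a timing run could not confirm a ratio: at the largest size both finish A is already sub-millisecond, and at the next size A times out while B still answers
import Mathlib
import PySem

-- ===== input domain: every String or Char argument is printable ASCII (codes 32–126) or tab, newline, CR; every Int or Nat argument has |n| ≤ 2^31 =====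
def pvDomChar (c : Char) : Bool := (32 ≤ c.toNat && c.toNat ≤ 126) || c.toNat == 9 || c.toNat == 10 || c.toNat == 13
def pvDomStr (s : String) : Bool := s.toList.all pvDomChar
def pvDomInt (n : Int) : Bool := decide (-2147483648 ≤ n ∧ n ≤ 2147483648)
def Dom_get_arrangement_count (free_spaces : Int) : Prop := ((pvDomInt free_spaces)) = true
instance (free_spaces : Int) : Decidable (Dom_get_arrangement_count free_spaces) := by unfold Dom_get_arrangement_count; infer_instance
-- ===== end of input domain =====

-- ===== PORT A =====
-- exponential double-branch recursion, transliterated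
def get_arrangement_count (free_spaces : Int) : Int :=
  if free_spaces = 0 then 1
  else if free_spaces < 2 then 0
  else
    (if free_spaces ≥ 3 then 2 + get_arrangement_count (free_spaces - 3) else 0)
      + (2 + get_arrangement_count (free_spaces - 2))
termination_by free_spaces.toNat
decreasing_by all_goals omega

-- ===== PORT B =====
-- B: bottom-up rolling three-variable DP
def pvAltLoop : Nat → Int × Int × Int → Int × Int × Int
  | 0, s => s
  | k+1, (x, y, z) => pvAltLoop k (y, z, 4 + y + x)

def get_arrangement_count_alt (free_spaces : Int) : Int :=
  if free_spaces < 2 then (if free_spaces = 0 then 1 else 0)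
  else (pvAltLoop (free_spaces - 2).toNat (1, 0, 3)).2.2

-- ===== PRECONDITION & SPEC =====
-- Pre_ excludes only large free_spaces on which Python A never returns: its first recursive
-- descent overflows the interpreter stack (RecursionError) once free_spaces is large enough.
def Pre_get_arrangement_count (free_spaces : Int) : Prop := free_spaces ≤ 29000
instance (free_spaces : Int) : Decidable (Pre_get_arrangement_count free_spaces) := by unfold Pre_get_arrangement_count; infer_instance
def pvWitness_get_arrangement_count : Int := 10

def Spec_get_arrangement_count (free_spaces : Int) (out : Int) : Prop := out = get_arrangement_count_alt free_spaces
instance (free_spaces : Int) (out : Int) : Decidable (Spec_get_arrangement_count free_spaces out) := by unfold Spec_get_arrangement_count; infer_instance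

-- ===== CLAIM (what is proved, stated in full; the proofs are below) =====
def Claim_equal_get_arrangement_count : Prop := ∀ (free_spaces : Int), Dom_get_arrangement_count free_spaces → Pre_get_arrangement_count free_spaces → Spec_get_arrangement_count free_spaces (get_arrangement_count free_spaces)

-- ===== LEMMAS AND PROOFS =====
lemma A_zero : get_arrangement_count 0 = 1 := by
  rw [get_arrangement_count.eq_def]; norm_num

lemma A_one : get_arrangement_count 1 = 0 := by
  rw [get_arrangement_count.eq_def]; norm_num

lemma A_two : get_arrangement_count 2 = 3 := by
  rw [get_arrangement_count.eq_def]; norm_num [A_zero]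

lemma A_step (m : Nat) :
    get_arrangement_count ((m : Int) + 3) =
      4 + get_arrangement_count ((m : Int) + 1) + get_arrangement_count (m : Int) := by
  rw [get_arrangement_count.eq_def]
  have h0 : ¬((m : Int) + 3 = 0) := by omega
  have h1 : ¬((m : Int) + 3 < 2) := by omega
  have h2 : (m : Int) + 3 ≥ 3 := by omega
  rw [if_neg h0, if_neg h1, if_pos h2]
  have e3 : (m : Int) + 3 - 3 = (m : Int) := by ring
  have e2 : (m : Int) + 3 - 2 = (m : Int) + 1 := by ring
  rw [e3, e2]; ring

lemma loop_inv (k m : Nat) :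
    pvAltLoop k (get_arrangement_count m, get_arrangement_count ((m : Int) + 1),
      get_arrangement_count ((m : Int) + 2)) =
    (get_arrangement_count ((m : Int) + k), get_arrangement_count ((m : Int) + k + 1),
      get_arrangement_count ((m : Int) + k + 2)) := by
  induction k generalizing m with
  | zero => simp [pvAltLoop]
  | succ k ih =>
    rw [pvAltLoop]
    have hs : 4 + get_arrangement_count ((m : Int) + 1) + get_arrangement_count m =
        get_arrangement_count ((m : Int) + 3) := by rw [A_step]
    have h1 : ((m + 1 : Nat) : Int) = (m : Int) + 1 := by push_cast; ring
    have := ih (m + 1)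
    rw [h1] at this
    have e1 : (m : Int) + 1 + 1 = (m : Int) + 2 := by ring
    have e2 : (m : Int) + 1 + 2 = (m : Int) + 3 := by ring
    rw [e1, e2] at this
    rw [hs, this]
    congr 1 <;> [skip; congr 1] <;> congr 1 <;> push_cast <;> ring

-- ===== VERDICT (by name: the statement is the Claim_ definition above) =====
theorem get_arrangement_count_spec : Claim_equal_get_arrangement_count := by
  intro n _ _
  unfold Spec_get_arrangement_count get_arrangement_count_alt
  by_cases h : n < 2
  · rw [if_pos h]
    by_cases h0 : n = 0
    · subst h0; rw [if_pos rfl, A_zero]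
    · rw [if_neg h0]
      rw [get_arrangement_count.eq_def, if_neg h0, if_pos h]
  · rw [if_neg h]
    set k := (n - 2).toNat with hk
    have hn : n = (k : Int) + 2 := by omega
    have := loop_inv k 0
    simp only [Int.natCast_zero, zero_add, A_zero, A_one, A_two] at this
    rw [this]
    rw [hn]
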